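-- pv_equiv track=rewrite | github.com/AlexeiVartoumian/algorithmicProblems | codeSignal/String/isMac48Address.py | solution
-- ===== SOURCE A (Python) =====
-- def solution(inputString):
--
--
--     if len(inputString) != 17:
--         return False
--
--     def isInteger(char):
--
--         if char.isdigit():
--             if int(char) >= 0 and int(char) <= 9:
--                 return True
--         return False
--
--     def ishex(char):
--
--         return (ord(char) - 65 <= 5 and ord(char) -65 >=0)
--
--     teststring = inputString.split("-")
--     if len(teststring)!=6:
--         return False
--     for i in teststring:
--
--         for j in i:
--             if not isInteger(j) and not ishex(j):
--                 return False
--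
--     return True
-- ===== SOURCE B (Python) =====
-- def solution(inputString):
--     if len(inputString) != 17:
--         return False
--     dashes = 0
--     for ch in inputString:
--         if ch == '-':
--             dashes += 1
--         elif not (ch.isdigit() or 'A' <= ch <= 'F'):
--             return False
--     return dashes == 5
-- ===== Notes on version B (the rewrite author's own statement) =====
-- stated objective: simpler
-- what changed: B drops the split-into-groups pass and the nested loops: one flat scan over the characters counts the dashes while validating every non-dash character, then checks dashes == 5 (equivalent to A's 6 split parts at length 17).
import Mathlib
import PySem

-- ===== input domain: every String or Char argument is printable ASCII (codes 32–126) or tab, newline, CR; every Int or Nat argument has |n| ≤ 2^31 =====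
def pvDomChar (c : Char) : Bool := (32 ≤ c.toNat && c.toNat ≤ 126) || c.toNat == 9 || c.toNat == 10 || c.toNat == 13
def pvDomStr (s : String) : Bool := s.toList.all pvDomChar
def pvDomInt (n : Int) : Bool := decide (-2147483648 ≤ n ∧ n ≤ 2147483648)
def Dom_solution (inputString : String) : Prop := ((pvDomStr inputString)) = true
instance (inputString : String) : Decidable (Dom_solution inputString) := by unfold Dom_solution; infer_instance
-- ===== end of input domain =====

-- B replaces A's split-into-groups plus nested validation loops by one flat scan that counts
-- dashes while validating the other characters; same return value, same O(n) cost.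

-- ===== PORT A =====
-- isInteger(char): char.isdigit() and 0 <= int(char) <= 9 (int(char) can only raise outside the ASCII domain; none ↦ false there)
def pvIsInteger (c : Char) : Bool :=
  if PySem.Chars.isdigit c then
    match PySem.Int.ofChars? [c] with
    | some n => decide (0 ≤ n) && decide (n ≤ 9)
    | none => false
  else false

-- ishex(char): ord(char) - 65 <= 5 and ord(char) - 65 >= 0
def pvIshex (c : Char) : Bool :=
  decide ((c.toNat : Int) - 65 ≤ 5) && decide (0 ≤ (c.toNat : Int) - 65)

-- inner 'for j in i: if not isInteger(j) and not ishex(j): return False'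
def pvInnerA : List Char → Bool
  | [] => true
  | c :: cs => if !pvIsInteger c && !pvIshex c then false else pvInnerA cs

-- outer 'for i in teststring'
def pvOuterA : List (List Char) → Bool
  | [] => true
  | p :: ps => if pvInnerA p then pvOuterA ps else false

def solution (inputString : String) : Bool :=
  if PySem.Str.len inputString ≠ 17 then false
  else
    -- inputString.split("-"): the sep is nonempty, so Str.split? returns exactly some (Chars.splitOn … ['-'])
    let teststring := PySem.Chars.splitOn inputString.toList ['-']
    if (teststring.length : Int) ≠ 6 then false
    else pvOuterA teststring

-- ===== PORT B =====
def pvOkB (c : Char) : Bool := PySem.Chars.isdigit c || (decide ('A' ≤ c) && decide (c ≤ 'F'))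

-- the single pass: count dashes, reject any other invalid character, finally dashes == 5
def pvScanB : List Char → Int → Bool
  | [], dashes => dashes == 5
  | c :: cs, dashes =>
      if c == '-' then pvScanB cs (dashes + 1)
      else if pvOkB c then pvScanB cs dashes
      else false

def solution_alt (inputString : String) : Bool :=
  if PySem.Str.len inputString ≠ 17 then false
  else pvScanB inputString.toList 0

-- ===== PRECONDITION & SPEC =====
def Spec_solution (inputString : String) (out : Bool) : Prop := out = solution_alt inputString
instance (inputString : String) (out : Bool) : Decidable (Spec_solution inputString out) := by unfold Spec_solution; infer_instance

-- ===== CLAIM (what is proved, stated in full; the proofs are below) =====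
def Claim_equal_solution : Prop := ∀ (inputString : String), Dom_solution inputString → Spec_solution inputString (solution inputString)

-- ===== LEMMAS AND PROOFS =====

theorem pv_char_eq_of_toNat {c d : Char} (h : c.toNat = d.toNat) : c = d :=
  Char.ext (UInt32.toNat_inj.mp h)

-- A's valid-character test equals B's: isInteger collapses to isdigit, ishex to 'A' ≤ c ≤ 'F'
theorem pvIsInteger_eq (c : Char) : pvIsInteger c = PySem.Chars.isdigit c := by
  by_cases hd : PySem.Chars.isdigit c = true
  · have h1 : '0' ≤ c ∧ c ≤ '9' := by simpa [PySem.Chars.isdigit] using hd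
    have h48 : 48 ≤ c.toNat := by simpa [Char.le_def, UInt32.le_iff_toNat_le] using h1.1
    have h57 : c.toNat ≤ 57 := by simpa [Char.le_def, UInt32.le_iff_toNat_le] using h1.2
    have h : c.toNat = 48 ∨ c.toNat = 49 ∨ c.toNat = 50 ∨ c.toNat = 51 ∨ c.toNat = 52 ∨
        c.toNat = 53 ∨ c.toNat = 54 ∨ c.toNat = 55 ∨ c.toNat = 56 ∨ c.toNat = 57 := by omega
    rcases h with h|h|h|h|h|h|h|h|h|h <;>
      first
      | (rw [pv_char_eq_of_toNat (d := '0') h]; decide)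
      | (rw [pv_char_eq_of_toNat (d := '1') h]; decide)
      | (rw [pv_char_eq_of_toNat (d := '2') h]; decide)
      | (rw [pv_char_eq_of_toNat (d := '3') h]; decide)
      | (rw [pv_char_eq_of_toNat (d := '4') h]; decide)
      | (rw [pv_char_eq_of_toNat (d := '5') h]; decide)
      | (rw [pv_char_eq_of_toNat (d := '6') h]; decide)
      | (rw [pv_char_eq_of_toNat (d := '7') h]; decide)
      | (rw [pv_char_eq_of_toNat (d := '8') h]; decide)
      | (rw [pv_char_eq_of_toNat (d := '9') h]; decide)
  · simp [pvIsInteger, hd]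

theorem pvIshex_eq (c : Char) : pvIshex c = (decide ('A' ≤ c) && decide (c ≤ 'F')) := by
  by_cases h1 : (65 : Nat) ≤ c.toNat <;> by_cases h2 : c.toNat ≤ 70 <;>
    simp [pvIshex, Char.le_def, UInt32.le_iff_toNat_le, *]

theorem pvValid_eq (c : Char) : (pvIsInteger c || pvIshex c) = pvOkB c := by
  rw [pvIsInteger_eq, pvIshex_eq, pvOkB]

-- a direct reference model of Python's s.split("-") (accumulating the current group front-first)
def pvParts : List Char → List Char → List (List Char)
  | pre, [] => [pre]
  | pre, c :: rest => if c == '-' then pre :: pvParts [] rest else pvParts (pre ++ [c]) rest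

theorem pv_go_eq (l : List Char) : ∀ (fuel : Nat) (cur : List Char) (acc : List (List Char)),
    l.length < fuel →
    PySem.Chars.splitOn.go ['-'] fuel l cur acc = acc.reverse ++ pvParts cur.reverse l := by
  induction l with
  | nil =>
    intro fuel cur acc h
    match fuel, h with
    | fuel + 1, _ => simp [PySem.Chars.splitOn.go, pvParts]
  | cons c rest ih =>
    intro fuel cur acc h
    match fuel, h with
    | f + 1, h =>
      have hf : rest.length < f := by simpa using h
      by_cases hc : c = '-'
      · subst hc
        rw [show PySem.Chars.splitOn.go ['-'] (f + 1) ('-' :: rest) cur acc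
              = PySem.Chars.splitOn.go ['-'] f rest [] (cur.reverse :: acc) from by
            simp [PySem.Chars.splitOn.go, List.isPrefixOf]]
        rw [ih f [] (cur.reverse :: acc) hf]
        simp [pvParts]
      · rw [show PySem.Chars.splitOn.go ['-'] (f + 1) (c :: rest) cur acc
              = PySem.Chars.splitOn.go ['-'] f rest (c :: cur) acc from by
            simp [PySem.Chars.splitOn.go, List.isPrefixOf, Ne.symm hc]]
        rw [ih f (c :: cur) acc hf]
        simp [pvParts, hc]

theorem pv_splitOn_eq (cs : List Char) : PySem.Chars.splitOn cs ['-'] = pvParts [] cs := by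
  have := pv_go_eq cs (cs.length + 1) [] [] (by omega)
  simpa [PySem.Chars.splitOn] using this

theorem pvParts_length (cs : List Char) : ∀ pre, (pvParts pre cs).length = cs.count '-' + 1 := by
  induction cs with
  | nil => intro pre; simp [pvParts]
  | cons c rest ih =>
    intro pre
    by_cases hc : c = '-' <;> simp [pvParts, hc, ih]

theorem pvInnerA_eq (p : List Char) : pvInnerA p = p.all (fun c => pvIsInteger c || pvIshex c) := by
  induction p with
  | nil => rfl
  | cons c cs ih =>
    simp only [pvInnerA, List.all_cons, ih]
    by_cases h1 : pvIsInteger c = true <;> by_cases h2 : pvIshex c = true <;> simp [h1, h2]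

theorem pvOuterA_parts (cs : List Char) : ∀ pre,
    pvOuterA (pvParts pre cs) = (pvInnerA pre && cs.all (fun c => c == '-' || pvOkB c)) := by
  induction cs with
  | nil => intro pre; by_cases h : pvInnerA pre = true <;> simp [pvParts, pvOuterA, h]
  | cons c rest ih =>
    intro pre
    by_cases hc : c = '-'
    · subst hc
      simp only [pvParts, beq_self_eq_true, if_true, pvOuterA]
      by_cases hp : pvInnerA pre = true <;> simp [hp, ih, pvInnerA]
    · simp only [pvParts, beq_iff_eq, hc, if_false, ih, List.all_cons]
      have hin : pvInnerA (pre ++ [c]) = (pvInnerA pre && (pvIsInteger c || pvIshex c)) := by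
        simp [pvInnerA_eq]
      have hb : (c == '-') = false := by simp [hc]
      rw [hin, pvValid_eq, hb]
      simp [Bool.and_assoc]

theorem pvScanB_eq (cs : List Char) : ∀ d : Int,
    pvScanB cs d = (cs.all (fun c => c == '-' || pvOkB c) && (d + (cs.count '-' : Int) == 5)) := by
  induction cs with
  | nil => intro d; simp [pvScanB]
  | cons c rest ih =>
    intro d
    by_cases hc : c = '-'
    · subst hc
      simp only [pvScanB, beq_self_eq_true, if_true, ih, List.count_cons]
      rw [show d + 1 + ((List.count '-' rest : Nat) : Int)
            = d + (((List.count '-' rest : Nat) : Int) + 1) from by ring]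
      push_cast
      ring_nf
      simp
    · by_cases hv : pvOkB c = true <;>
        simp [pvScanB, hc, hv, ih]

-- ===== VERDICT (by name: the statement is the Claim_ definition above) =====
theorem solution_spec : Claim_equal_solution := by
  intro s _
  unfold Spec_solution solution solution_alt
  by_cases hlen : PySem.Str.len s = 17
  · simp only [hlen, ne_eq, not_true_eq_false, if_false]
    rw [pv_splitOn_eq, pvParts_length, pvOuterA_parts, pvScanB_eq]
    by_cases hc : s.toList.count '-' = 5
    · simp [hc, pvInnerA]
    · have e1 : decide (((List.count '-' s.toList : Nat) : Int) + 1 = 6) = false := by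
        simp; omega
      have e2 : ((((List.count '-' s.toList : Nat) : Int)) == 5) = false := by
        simp; omega
      simp [pvInnerA, e1, e2]
  · have h' : ¬((s.length : Int) = 17) := by simpa using hlen
    simp [h']
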